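-- pv_equiv track=rewrite | github.com/ertsiger/induction-subgoal-automata-rl | src/config/config_generator.py | _generate_isa_random_seeds
-- ===== SOURCE A (Python) =====
-- BASE_ISA_SEEDS = [25101993, 25041996, 31121960, 20091953, 30422020, 31071993, 11091714, 25071992, 1123581321, 31415926]
--
-- def _generate_isa_random_seeds(num_runs):
--     isa_random_seeds = []
--     seed_sum = 0
--     for i in range(num_runs):
--         seed = BASE_ISA_SEEDS[i % len(BASE_ISA_SEEDS)] + seed_sum
--         isa_random_seeds.append(seed)
--         if (i + 1) % len(BASE_ISA_SEEDS) == 0: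
--             seed_sum += 1
--     return isa_random_seeds
-- ===== SOURCE B (Python) =====
-- BASE_ISA_SEEDS = [25101993, 25041996, 31121960, 20091953, 30422020, 31071993, 11091714, 25071992, 1123581321, 31415926]
--
-- def _generate_isa_random_seeds(num_runs):
--     # Build whole blocks: block k is the base list shifted by k; then cut to length.
--     if num_runs <= 0:
--         return []
--     L = len(BASE_ISA_SEEDS)
--     blocks = (num_runs + L - 1) // L
--     out = []
--     for k in range(blocks):
--         out.extend(s + k for s in BASE_ISA_SEEDS)
--     return out[:num_runs]
-- ===== Notes on version B (the rewrite author's own statement) =====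
-- stated objective: alternative
-- what changed: Instead of computing each seed one index at a time with a running seed_sum, B builds the output in whole blocks -- ceil(n/L) shifted copies of BASE_ISA_SEEDS (block k is the base list with k added to every element) -- and then truncates the concatenation to num_runs; there is no per-index state, modulo, or conditional.
import Mathlib
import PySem

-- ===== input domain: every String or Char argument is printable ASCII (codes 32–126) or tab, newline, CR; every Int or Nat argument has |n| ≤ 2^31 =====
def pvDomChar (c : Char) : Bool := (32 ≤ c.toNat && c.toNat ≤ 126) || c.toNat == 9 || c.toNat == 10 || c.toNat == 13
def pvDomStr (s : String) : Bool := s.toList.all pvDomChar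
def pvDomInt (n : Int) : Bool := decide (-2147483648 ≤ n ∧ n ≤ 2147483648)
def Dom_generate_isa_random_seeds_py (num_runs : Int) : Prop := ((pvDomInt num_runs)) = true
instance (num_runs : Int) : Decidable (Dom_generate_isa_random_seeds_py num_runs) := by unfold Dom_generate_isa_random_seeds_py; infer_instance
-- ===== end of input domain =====

-- B builds the result as ceil(n/L) whole shifted copies of the base list and then truncates,
-- replacing A's per-index loop with running seed_sum state (objective: alternative decomposition).


-- ===== PORT A =====
def baseIsaSeeds : List Int := [25101993, 25041996, 31121960, 20091953, 30422020, 31071993, 11091714, 25071992, 1123581321, 31415926]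

-- literal port of A: foldl over range(num_runs) maintaining (isa_random_seeds, seed_sum);
-- BASE_ISA_SEEDS[i % 10] indexing is always in range (0 ≤ i % 10 < 10), so pyGetD is exact here
def generate_isa_random_seeds_py (num_runs : Int) : List Int :=
  ((PySem.List.pyRange 0 num_runs 1).foldl (fun st i =>
    let seed := PySem.List.pyGetD baseIsaSeeds (PySem.Int.mod i (baseIsaSeeds.length : Int)) 0 + st.2
    let acc := st.1 ++ [seed]
    if PySem.Int.mod (i + 1) (baseIsaSeeds.length : Int) = 0 then (acc, st.2 + 1) else (acc, st.2))
    ([], 0)).1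

-- ===== PORT B =====
-- port of Source B: ceil(num_runs/L) whole blocks, block k = base list shifted by k, then out[:num_runs]
def generate_isa_random_seeds_py_alt (num_runs : Int) : List Int :=
  if num_runs ≤ 0 then []
  else
    let L : Int := (baseIsaSeeds.length : Int)
    let blocks := PySem.Int.floordiv (num_runs + L - 1) L
    let out := (PySem.List.pyRange 0 blocks 1).foldl
      (fun acc k => acc ++ baseIsaSeeds.map (fun s => s + k)) []
    PySem.List.slice out none (some num_runs)

-- ===== PRECONDITION & SPEC =====
def Spec_generate_isa_random_seeds_py (num_runs : Int) (out : List Int) : Prop := out = generate_isa_random_seeds_py_alt num_runs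
instance (num_runs : Int) (out : List Int) : Decidable (Spec_generate_isa_random_seeds_py num_runs out) := by unfold Spec_generate_isa_random_seeds_py; infer_instance

-- ===== CLAIM =====
def Claim_equal_generate_isa_random_seeds_py : Prop := ∀ (num_runs : Int), Dom_generate_isa_random_seeds_py num_runs → Spec_generate_isa_random_seeds_py num_runs (generate_isa_random_seeds_py num_runs)

-- ===== LEMMAS AND PROOFS =====

-- the common closed form both sides are reduced to
def seedAt (i : Int) : Int :=
  PySem.List.pyGetD baseIsaSeeds (PySem.Int.mod i (baseIsaSeeds.length : Int)) 0
    + PySem.Int.floordiv i (baseIsaSeeds.length : Int)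

-- A's loop invariant: after the first n iterations the state is (the first n closed-form seeds, n // 10)
theorem loop_invariant (n : Nat) :
    (PySem.List.pyRange 0 (n : Int) 1).foldl (fun st i =>
      let seed := PySem.List.pyGetD baseIsaSeeds (PySem.Int.mod i (baseIsaSeeds.length : Int)) 0 + st.2
      let acc := st.1 ++ [seed]
      if PySem.Int.mod (i + 1) (baseIsaSeeds.length : Int) = 0 then (acc, st.2 + 1) else (acc, st.2))
      ([], 0)
    = ((PySem.List.pyRange 0 (n : Int) 1).map seedAt, ((n / 10 : Nat) : Int)) := by
  induction n with
  | zero => simp [PySem.List.pyRange_one_eq_nil]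
  | succ n ih =>
    have hcast : ((n + 1 : Nat) : Int) = (n : Int) + 1 := by push_cast; ring
    rw [hcast, PySem.List.pyRange_one_succ_right (by positivity), List.foldl_append, List.map_append, ih]
    simp only [List.foldl_cons, List.foldl_nil, List.map_cons, List.map_nil]
    have hlen : (baseIsaSeeds.length : Int) = 10 := by decide
    rw [hlen]
    have hmod : PySem.Int.mod ((n : Int) + 1) 10 = (((n + 1) % 10 : Nat) : Int) := by
      rw [hcast.symm]; exact_mod_cast PySem.Int.mod_natCast (n + 1) 10
    have hdiv : PySem.Int.floordiv (n : Int) 10 = ((n / 10 : Nat) : Int) := by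
      exact_mod_cast PySem.Int.floordiv_natCast n 10
    by_cases h : (n + 1) % 10 = 0
    · rw [if_pos (by rw [hmod, h]; rfl)]
      simp only [seedAt, hlen, hdiv, Prod.mk.injEq]
      refine ⟨trivial, ?_⟩
      have : (n + 1) / 10 = n / 10 + 1 := by omega
      rw [this]; push_cast; ring
    · rw [if_neg (by rw [hmod]; exact_mod_cast fun hc => h (by exact_mod_cast hc))]
      simp only [seedAt, hlen, hdiv, Prod.mk.injEq]
      refine ⟨trivial, ?_⟩
      have : (n + 1) / 10 = n / 10 := by omega
      rw [this]

-- one block of B equals the closed form on its index range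
theorem block_eq (m : Nat) :
    (PySem.List.pyRange ((10 * m : Nat) : Int) ((10 * m + 10 : Nat) : Int) 1).map seedAt
      = baseIsaSeeds.map (fun s => s + (m : Int)) := by
  have h : ((10 * m + 10 : Nat) : Int) - ((10 * m : Nat) : Int) = (10 : Int) := by push_cast; ring
  rw [PySem.List.pyRange_one, h, List.map_map]
  have key : ∀ j : Nat, j < 10 →
      seedAt (((10 * m : Nat) : Int) + (j : Int))
        = baseIsaSeeds.getD j 0 + (m : Int) := by
    intro j hj
    have hc : ((10 * m : Nat) : Int) + (j : Int) = ((10 * m + j : Nat) : Int) := by push_cast; ring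
    unfold seedAt
    rw [hc]
    have hlen : (baseIsaSeeds.length : Int) = ((10 : Nat) : Int) := by decide
    rw [hlen, PySem.Int.mod_natCast, PySem.Int.floordiv_natCast, PySem.List.pyGetD_natCast]
    have h1 : (10 * m + j) % 10 = j := by omega
    have h2 : (10 * m + j) / 10 = m := by omega
    rw [h1, h2]
  show ((List.range (10 : Int).toNat).map _) = _
  have hr : (List.range (10 : Int).toNat) = [0,1,2,3,4,5,6,7,8,9] := by decide
  rw [hr]
  simp only [List.map_cons, List.map_nil, Function.comp]
  rw [key 0 (by omega), key 1 (by omega), key 2 (by omega), key 3 (by omega), key 4 (by omega),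
      key 5 (by omega), key 6 (by omega), key 7 (by omega), key 8 (by omega), key 9 (by omega)]
  simp [baseIsaSeeds]

-- B's block foldl equals the closed form over the first 10*m indices
theorem blocks_eq (m : Nat) :
    (PySem.List.pyRange 0 (m : Int) 1).foldl
      (fun acc k => acc ++ baseIsaSeeds.map (fun s => s + k)) []
    = (PySem.List.pyRange 0 ((10 * m : Nat) : Int) 1).map seedAt := by
  induction m with
  | zero => simp [PySem.List.pyRange_one_eq_nil]
  | succ m ih =>
    have hcast : ((m + 1 : Nat) : Int) = (m : Int) + 1 := by push_cast; ring
    rw [hcast, PySem.List.pyRange_one_succ_right (by positivity), List.foldl_append, ih]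
    simp only [List.foldl_cons, List.foldl_nil]
    have hsplit : PySem.List.pyRange 0 ((10 * (m + 1) : Nat) : Int) 1
        = PySem.List.pyRange 0 ((10 * m : Nat) : Int) 1
          ++ PySem.List.pyRange ((10 * m : Nat) : Int) ((10 * m + 10 : Nat) : Int) 1 := by
      have h10 : ((10 * (m + 1) : Nat) : Int) = ((10 * m + 10 : Nat) : Int) := by push_cast; ring
      rw [h10]
      exact PySem.List.pyRange_one_append 0 ((10 * m : Nat) : Int) _ (by positivity) (by push_cast; omega)
    rw [hsplit, List.map_append, block_eq]

-- ===== VERDICT =====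
theorem generate_isa_random_seeds_py_spec : Claim_equal_generate_isa_random_seeds_py := by
  intro num_runs _
  unfold Spec_generate_isa_random_seeds_py generate_isa_random_seeds_py generate_isa_random_seeds_py_alt
  by_cases h : num_runs ≤ 0
  · rw [if_pos h, PySem.List.pyRange_one_eq_nil h]; rfl
  · rw [if_neg h]
    set n : Nat := num_runs.toNat with hn
    have hnn : num_runs = (n : Int) := (Int.toNat_of_nonneg (by omega)).symm
    have hlen : (baseIsaSeeds.length : Int) = 10 := by decide
    rw [hnn, loop_invariant]
    show (PySem.List.pyRange 0 (n : Int) 1).map seedAt = _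
    simp only [hlen]
    have hb : PySem.Int.floordiv ((n : Int) + 10 - 1) 10 = (((n + 9) / 10 : Nat) : Int) := by
      have : (n : Int) + 10 - 1 = ((n + 9 : Nat) : Int) := by push_cast; ring
      rw [this]; exact_mod_cast PySem.Int.floordiv_natCast (n + 9) 10
    rw [hb, blocks_eq]
    rw [PySem.List.slice_to _ (by omega)]
    have hM : (PySem.List.pyRange 0 ((10 * ((n + 9) / 10) : Nat) : Int) 1)
        = (List.range (10 * ((n + 9) / 10))).map (fun k : Nat => (k : Int)) := by
      exact PySem.List.pyRange_zero_nat _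
    have hN : (PySem.List.pyRange 0 (n : Int) 1) = (List.range n).map (fun k : Nat => (k : Int)) := by
      exact PySem.List.pyRange_zero_nat _
    rw [hM, hN, List.map_map, List.map_map, ← List.map_take, List.take_range]
    have : min ((n : Int).toNat) (10 * ((n + 9) / 10)) = n := by omega
    rw [this]
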